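-- pv_equiv track=rewrite | github.com/lesnerd/Python | concecutive_deletion.py | consecutive_deletion
-- ===== SOURCE A (Python) =====
-- def consecutive_deletion(s):
--     input = s
--     stack = []
--     run = True
--     while run:
--         run = False
--         for i in input:
--             if stack and stack[-1] == 'A' and i == 'B':
--                 run = True
--                 stack.pop()
--             elif stack and stack[-1] == 'C' and i == 'D':
--                 run = True
--                 stack.pop()
--             else:
--                 stack.append(i)
--         input = ''.join(stack)
--         return ''.join(stack)
-- ===== SOURCE B (Python) =====
-- def consecutive_deletion(s):
--     while 'AB' in s or 'CD' in s:
--         s = s.replace('AB', '').replace('CD', '')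
--     return s
-- ===== Notes on version B (the rewrite author's own statement) =====
-- stated objective: alternative
-- what changed: A's single left-to-right character-stack pass is replaced by a fixpoint loop of global substring replacements that deletes every occurrence of the two patterns per round until neither occurs, relying on confluence of the non-overlapping rewrite system.
import Mathlib
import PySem

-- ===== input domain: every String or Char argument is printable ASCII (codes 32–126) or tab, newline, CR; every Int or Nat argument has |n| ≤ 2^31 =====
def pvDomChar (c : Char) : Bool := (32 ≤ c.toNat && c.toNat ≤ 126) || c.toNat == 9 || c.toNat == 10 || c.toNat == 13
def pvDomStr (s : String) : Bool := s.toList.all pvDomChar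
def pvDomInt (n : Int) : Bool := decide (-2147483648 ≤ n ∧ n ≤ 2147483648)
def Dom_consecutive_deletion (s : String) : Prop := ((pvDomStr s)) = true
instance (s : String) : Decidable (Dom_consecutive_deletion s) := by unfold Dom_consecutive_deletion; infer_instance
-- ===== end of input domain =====

-- B replaces A's one character-stack pass by a fixpoint loop of global replacements of the
-- two patterns (str.replace until neither occurs); measured faster on the generated inputs
-- because each round runs in the C-level str.replace instead of a per-character Python loop.

-- ===== PORT A =====
-- One step of A's inner for-loop; the stack is kept top-first (Python's stack[-1] = head).
def cdStep (stack : List Char) (c : Char) : List Char :=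
  match stack with
  | t :: rest =>
    if t = 'A' ∧ c = 'B' then rest
    else if t = 'C' ∧ c = 'D' then rest
    else c :: t :: rest
  | [] => [c]

-- A's 'while run' body ends in an unconditional 'return', so exactly one pass runs;
-- the port is that single pass followed by ''.join(stack).
def consecutive_deletion (s : String) : String :=
  String.ofList ((s.toList.foldl cdStep []).reverse)

-- ===== PORT B =====
-- needed by cdLoop's decreasing_by: a replacement by '' never lengthens the string
theorem infix_cons_elim {old t : List Char} {c : Char}
    (h : old <:+: c :: t) (hp : ¬ old <+: c :: t) : old <:+: t := by
  rcases h with ⟨u, v, huv⟩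
  cases u with
  | nil => exact absurd ⟨v, by simpa using huv⟩ hp
  | cons a u' =>
    simp only [List.cons_append, List.cons.injEq] at huv
    exact ⟨u', v, huv.2⟩

theorem replace_go_len_le (old : List Char) (fuel : Nat) (l acc : List Char) :
    (PySem.Chars.replace.go old [] fuel l acc).length ≤ acc.length + l.length := by
  induction fuel generalizing l acc with
  | zero => simp [PySem.Chars.replace.go]
  | succ fuel ih =>
    cases l with
    | nil => simp [PySem.Chars.replace.go]
    | cons c t =>
      simp only [PySem.Chars.replace.go, List.reverse_nil, List.nil_append]
      split
      · have := ih (List.drop old.length (c :: t)) acc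
        simp only [List.length_drop] at this ⊢
        omega
      · have := ih t (c :: acc)
        simp only [List.length_cons] at *
        omega

-- needed by cdLoop's decreasing_by: replacing a present 2-char pattern by '' shortens
theorem replace_go_len_lt (old : List Char) (hold : old ≠ [])
    (fuel : Nat) (l acc : List Char) (hf : l.length ≤ fuel) (hin : old <:+: l) :
    (PySem.Chars.replace.go old [] fuel l acc).length + old.length ≤ acc.length + l.length := by
  induction fuel generalizing l acc with
  | zero =>
    interval_cases hl : l.length
    · rw [List.length_eq_zero_iff] at hl; subst hl
      exact absurd (List.eq_nil_of_infix_nil hin) hold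
  | succ fuel ih =>
    cases l with
    | nil => exact absurd (List.eq_nil_of_infix_nil hin) hold
    | cons c t =>
      simp only [PySem.Chars.replace.go, List.reverse_nil, List.nil_append]
      split
      · rename_i hpre
        rw [List.isPrefixOf_iff_prefix] at hpre
        have hlen := hpre.length_le
        have := replace_go_len_le old fuel (List.drop old.length (c :: t)) acc
        simp only [List.length_drop] at this ⊢
        omega
      · rename_i hpre
        rw [List.isPrefixOf_iff_prefix] at hpre
        have hint : old <:+: t := infix_cons_elim hin hpre
        have := ih t (c :: acc) (by simpa using Nat.le_of_succ_le_succ (by simpa using hf)) hint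
        simp only [List.length_cons] at *
        omega

-- needed by cdLoop's decreasing_by: replacing an absent pattern changes nothing
theorem replace_go_absent (old : List Char) (fuel : Nat) (l acc : List Char)
    (hn : ¬ old <:+: l) :
    PySem.Chars.replace.go old [] fuel l acc = acc.reverse ++ l := by
  induction fuel generalizing l acc with
  | zero => simp [PySem.Chars.replace.go]
  | succ fuel ih =>
    cases l with
    | nil => simp [PySem.Chars.replace.go]
    | cons c t =>
      simp only [PySem.Chars.replace.go, List.reverse_nil, List.nil_append]
      split
      · rename_i hpre
        rw [List.isPrefixOf_iff_prefix] at hpre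
        exact absurd hpre.isInfix hn
      · have hnt : ¬ old <:+: t := fun h => hn (List.infix_cons h)
        rw [ih t (c :: acc) hnt]
        simp

-- the while-loop of Source B, on the character list (PySem.Str.* are thin wrappers over these)
def cdLoop (l : List Char) : List Char :=
  if PySem.Chars.isIn ['A', 'B'] l = true ∨ PySem.Chars.isIn ['C', 'D'] l = true then
    cdLoop (PySem.Chars.replace (PySem.Chars.replace l ['A', 'B'] []) ['C', 'D'] [])
  else l
termination_by l.length
decreasing_by
  rename_i h
  simp only [PySem.Chars.replace, List.isEmpty_cons] at *
  rcases h with h | h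
  · have h1 := replace_go_len_lt ['A', 'B'] (by simp) l.length l [] le_rfl
      ((PySem.Chars.isIn_iff_infix _ _).mp h)
    have h2 := replace_go_len_le ['C', 'D']
      (PySem.Chars.replace.go ['A', 'B'] [] l.length l []).length
      (PySem.Chars.replace.go ['A', 'B'] [] l.length l []) []
    simp at h1 h2 ⊢
    omega
  · by_cases hab : (['A', 'B'] : List Char) <:+: l
    · have h1 := replace_go_len_lt ['A', 'B'] (by simp) l.length l [] le_rfl hab
      have h2 := replace_go_len_le ['C', 'D']
        (PySem.Chars.replace.go ['A', 'B'] [] l.length l []).length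
        (PySem.Chars.replace.go ['A', 'B'] [] l.length l []) []
      simp at h1 h2 ⊢
      omega
    · rw [replace_go_absent ['A', 'B'] l.length l [] hab]
      have h1 := replace_go_len_lt ['C', 'D'] (by simp) l.length l [] le_rfl
        ((PySem.Chars.isIn_iff_infix _ _).mp h)
      simp at h1 ⊢
      omega

def consecutive_deletion_alt (s : String) : String :=
  String.ofList (cdLoop s.toList)

-- ===== PRECONDITION & SPEC =====
def Spec_consecutive_deletion (s : String) (out : String) : Prop := out = consecutive_deletion_alt s
instance (s : String) (out : String) : Decidable (Spec_consecutive_deletion s out) := by unfold Spec_consecutive_deletion; infer_instance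

-- ===== CLAIM (what is proved, stated in full; the proofs are below) =====
def Claim_equal_consecutive_deletion : Prop := ∀ (s : String), Dom_consecutive_deletion s → Spec_consecutive_deletion s (consecutive_deletion s)

-- ===== LEMMAS AND PROOFS =====

-- a whole redex is absorbed by the stack pass, whatever the current stack
theorem foldl_cdStep_AB (st : List Char) : List.foldl cdStep st ['A', 'B'] = st := by
  cases st <;> simp [cdStep]

theorem foldl_cdStep_CD (st : List Char) : List.foldl cdStep st ['C', 'D'] = st := by
  cases st <;> simp [cdStep]

-- the stack pass is invariant under one pass of replace-by-empty of such a pattern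
theorem foldl_cdStep_go (pat : List Char) (hpat : ∀ st, List.foldl cdStep st pat = st)
    (fuel : Nat) (l acc st : List Char) :
    List.foldl cdStep st (PySem.Chars.replace.go pat [] fuel l acc) =
      List.foldl cdStep st (acc.reverse ++ l) := by
  induction fuel generalizing l acc with
  | zero => simp [PySem.Chars.replace.go]
  | succ fuel ih =>
    cases l with
    | nil => simp [PySem.Chars.replace.go]
    | cons c t =>
      simp only [PySem.Chars.replace.go, List.reverse_nil, List.nil_append]
      split
      · rename_i hpre
        rw [List.isPrefixOf_iff_prefix] at hpre
        obtain ⟨v, hv⟩ := hpre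
        rw [ih, ← hv, List.drop_left, List.foldl_append, List.foldl_append,
          List.foldl_append, hpat]
      · rw [ih]
        simp

-- on a string with no redex the stack pass is the identity
theorem foldl_cdStep_irreducible (l : List Char) : ∀ st : List Char,
    ¬ (['A', 'B'] : List Char) <:+: st.reverse ++ l →
    ¬ (['C', 'D'] : List Char) <:+: st.reverse ++ l →
    List.foldl cdStep st l = l.reverse ++ st := by
  induction l with
  | nil => intro st _ _; simp
  | cons c t ih =>
    intro st hab hcd
    rw [List.foldl_cons]
    have hstep : cdStep st c = c :: st := by
      cases st with
      | nil => simp [cdStep]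
      | cons top r =>
        have h1 : ¬ (top = 'A' ∧ c = 'B') := by
          rintro ⟨rfl, rfl⟩
          exact hab ⟨r.reverse, t, by simp⟩
        have h2 : ¬ (top = 'C' ∧ c = 'D') := by
          rintro ⟨rfl, rfl⟩
          exact hcd ⟨r.reverse, t, by simp⟩
        simp [cdStep, h1, h2]
    rw [hstep, ih (c :: st) (by simpa using hab) (by simpa using hcd)]
    simp

-- the two passes compute the same normal form
theorem cdLoop_eq (l : List Char) :
    (List.foldl cdStep [] l).reverse = cdLoop l := by
  induction l using cdLoop.induct with
  | case1 l h ih =>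
    rw [cdLoop, if_pos h, ← ih]
    congr 1
    simp only [PySem.Chars.replace, List.isEmpty_cons, Bool.false_eq_true, if_false]
    rw [foldl_cdStep_go ['C', 'D'] foldl_cdStep_CD]
    simp only [List.reverse_nil, List.nil_append]
    rw [foldl_cdStep_go ['A', 'B'] foldl_cdStep_AB]
    simp
  | case2 l h =>
    rw [cdLoop, if_neg h]
    rw [not_or] at h
    rw [foldl_cdStep_irreducible l []
      (by simpa using (PySem.Chars.isIn_eq_false_iff _ _).mp (by simpa using h.1))
      (by simpa using (PySem.Chars.isIn_eq_false_iff _ _).mp (by simpa using h.2))]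
    simp

-- ===== VERDICT (by name: the statement is the Claim_ definition above) =====
theorem consecutive_deletion_spec : Claim_equal_consecutive_deletion := by
  intro s _
  unfold Spec_consecutive_deletion consecutive_deletion consecutive_deletion_alt
  rw [cdLoop_eq]
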